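-- pv_equiv track=rewrite | github.com/kserm/yapr_algorithms | 8_weather_chaos.py | weather_chaos
-- ===== SOURCE A (Python) =====
-- def weather_chaos(numbers):
--     chaos = 0
--     rng = len(numbers)
--     if rng > 1:
--         for i in range(1, rng-1):
--             if numbers[i-1] < numbers[i] > numbers[i+1]:
--                 chaos += 1
--         if numbers[0] > numbers[1]:
--             chaos += 1
--         if numbers[-1] > numbers[-2]:
--             chaos += 1
--     else:
--         chaos += 1
--     return chaos
-- ===== SOURCE B (Python) =====
-- def weather_chaos(numbers):
--     if len(numbers) <= 1:
--         return 1
--     signs = [(b > a) - (b < a) for a, b in zip(numbers, numbers[1:])]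
--     ext = [1] + signs + [-1]
--     return sum(1 for u, v in zip(ext, ext[1:]) if u > 0 and v < 0)
-- ===== Notes on version B (the rewrite author's own statement) =====
-- stated objective: alternative
-- what changed: B works on the derivative: it maps the list to the signs of consecutive differences, frames that sign sequence with a virtual rising edge (+1) and falling edge (-1), and counts up-then-down transitions, replacing A's index loop over elements plus two explicit boundary checks.
import Mathlib
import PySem

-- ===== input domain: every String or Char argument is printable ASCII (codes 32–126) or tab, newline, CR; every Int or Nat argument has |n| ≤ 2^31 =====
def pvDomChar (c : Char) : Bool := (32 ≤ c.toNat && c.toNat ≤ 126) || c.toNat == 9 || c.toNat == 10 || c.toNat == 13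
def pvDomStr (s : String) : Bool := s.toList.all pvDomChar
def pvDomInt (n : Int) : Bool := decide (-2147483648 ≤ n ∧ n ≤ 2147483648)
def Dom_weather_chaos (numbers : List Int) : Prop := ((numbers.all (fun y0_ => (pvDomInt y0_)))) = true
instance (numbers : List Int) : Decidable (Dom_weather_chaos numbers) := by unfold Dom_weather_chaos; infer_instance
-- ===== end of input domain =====

-- B counts peaks on the derivative: it takes the signs of consecutive differences,
-- frames them with a virtual rising (+1) and falling (-1) edge, and counts
-- up-then-down transitions; objective: alternative formulation of the same count.

-- ===== PORT A =====
-- every index A uses is in range when the branch runs, so pyGetD with default 0 is exact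
def weather_chaos (numbers : List Int) : Int :=
  let chaos : Int := 0
  let rng := numbers.length
  if (rng : Int) > 1 then
    let chaos := (PySem.List.pyRange 1 ((rng : Int) - 1) 1).foldl
      (fun acc i =>
        if PySem.List.pyGetD numbers (i - 1) 0 < PySem.List.pyGetD numbers i 0 ∧
           PySem.List.pyGetD numbers i 0 > PySem.List.pyGetD numbers (i + 1) 0
        then acc + 1 else acc) chaos
    let chaos := if PySem.List.pyGetD numbers 0 0 > PySem.List.pyGetD numbers 1 0 then chaos + 1 else chaos
    let chaos := if PySem.List.pyGetD numbers (-1) 0 > PySem.List.pyGetD numbers (-2) 0 then chaos + 1 else chaos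
    chaos
  else chaos + 1

-- ===== PORT B =====
def weather_chaos_alt (numbers : List Int) : Int :=
  if numbers.length ≤ 1 then 1
  else
    let signs := (numbers.zip (numbers.drop 1)).map
      (fun p => (if p.2 > p.1 then (1 : Int) else 0) - (if p.2 < p.1 then 1 else 0))
    let ext := [(1 : Int)] ++ signs ++ [-1]
    (ext.zip (ext.drop 1)).foldl
      (fun acc p => if p.1 > 0 ∧ p.2 < 0 then acc + 1 else acc) 0

-- ===== PRECONDITION & SPEC =====
def Spec_weather_chaos (numbers : List Int) (out : Int) : Prop := out = weather_chaos_alt numbers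
instance (numbers : List Int) (out : Int) : Decidable (Spec_weather_chaos numbers out) := by unfold Spec_weather_chaos; infer_instance

-- ===== CLAIM (what is proved, stated in full; the proofs are below) =====
def Claim_equal_weather_chaos : Prop := ∀ (numbers : List Int), Dom_weather_chaos numbers → Spec_weather_chaos numbers (weather_chaos numbers)

-- ===== LEMMAS AND PROOFS =====

-- number of strict interior peaks (middle of a consecutive triple)
def interiorCnt : List Int → Int
  | a :: b :: c :: rest => (if a < b ∧ b > c then 1 else 0) + interiorCnt (b :: c :: rest)
  | _ => 0
termination_by l => l.length

-- number of adjacent (positive, negative) pairs in a sign sequence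
def pairCnt : List Int → Int
  | u :: v :: t => (if u > 0 ∧ v < 0 then 1 else 0) + pairCnt (v :: t)
  | _ => 0
termination_by l => l.length

def sgn (a b : Int) : Int := (if b > a then 1 else 0) - (if b < a then 1 else 0)

def signsOf : List Int → List Int
  | a :: b :: t => sgn a b :: signsOf (b :: t)
  | _ => []
termination_by l => l.length

lemma mapzip_eq_signsOf (l : List Int) :
    (l.zip (l.drop 1)).map
      (fun p => (if p.2 > p.1 then (1 : Int) else 0) - (if p.2 < p.1 then 1 else 0))
    = signsOf l := by
  induction l with
  | nil => simp [signsOf]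
  | cons a t ih =>
    match t with
    | [] => simp [signsOf]
    | b :: v =>
      have hz : ((a :: b :: v).zip ((a :: b :: v).drop 1))
          = (a, b) :: ((b :: v).zip ((b :: v).drop 1)) := by simp [List.zip]
      rw [hz, List.map_cons, ih, signsOf, sgn]

lemma zip2_fold (l : List Int) : ∀ c : Int,
    (l.zip (l.drop 1)).foldl
      (fun acc p => if p.1 > 0 ∧ p.2 < 0 then acc + 1 else acc) c
    = c + pairCnt l := by
  induction l with
  | nil => intro c; simp [pairCnt]
  | cons a t ih =>
    intro c
    match t with
    | [] => simp [pairCnt]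
    | b :: v =>
      have hz : ((a :: b :: v).zip ((a :: b :: v).drop 1))
          = (a, b) :: ((b :: v).zip ((b :: v).drop 1)) := by simp [List.zip]
      rw [hz, List.foldl_cons, ih, pairCnt]
      split_ifs <;> ring

lemma pairCnt_signsOf (l : List Int) : pairCnt (signsOf l) = interiorCnt l := by
  induction l with
  | nil => simp [signsOf, interiorCnt, pairCnt]
  | cons a t ih =>
    match t with
    | [] => simp [signsOf, interiorCnt, pairCnt]
    | [b] => simp [signsOf, interiorCnt, pairCnt]
    | b :: cc :: v =>
      have h1 : signsOf (a :: b :: cc :: v) = sgn a b :: sgn b cc :: signsOf (cc :: v) := by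
        rw [signsOf, signsOf]
      have h2 : signsOf (b :: cc :: v) = sgn b cc :: signsOf (cc :: v) := by rw [signsOf]
      rw [h1, pairCnt, ← h2, ih, interiorCnt]
      have e1 : sgn a b > 0 ↔ a < b := by unfold sgn; split_ifs <;> omega
      have e2 : sgn b cc < 0 ↔ b > cc := by unfold sgn; split_ifs <;> omega
      have : (sgn a b > 0 ∧ sgn b cc < 0) ↔ (a < b ∧ b > cc) := and_congr e1 e2
      split_ifs with hx hy hy
      · ring
      · exact absurd (this.mp hx) hy
      · exact absurd (this.mpr hy) hx
      · ring

lemma signsOf_append (t : List Int) : ∀ (a s : Int),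
    signsOf ((a :: t) ++ [s]) = signsOf (a :: t) ++ [sgn ((a :: t).getD t.length 0) s] := by
  induction t with
  | nil => intro a s; simp [signsOf]
  | cons b v ih =>
    intro a s
    have h1 : signsOf ((a :: b :: v) ++ [s]) = sgn a b :: signsOf ((b :: v) ++ [s]) := by
      simp only [List.cons_append]; rw [signsOf]
    rw [h1, ih b s, signsOf]
    simp
    rfl

lemma pairCnt_head (u u' : Int) (t : List Int) (h : u > 0 ↔ u' > 0) :
    pairCnt (u :: t) = pairCnt (u' :: t) := by
  match t with
  | [] => simp [pairCnt]
  | v :: w =>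
    rw [pairCnt, pairCnt]
    have : (u > 0 ∧ v < 0) ↔ (u' > 0 ∧ v < 0) := and_congr h Iff.rfl
    split_ifs with hx hy hy
    · rfl
    · exact absurd (this.mp hx) hy
    · exact absurd (this.mpr hy) hx
    · rfl

lemma pairCnt_last (ws : List Int) : ∀ (u v v' : Int), (v < 0 ↔ v' < 0) →
    pairCnt (u :: ws ++ [v]) = pairCnt (u :: ws ++ [v']) := by
  induction ws with
  | nil =>
    intro u v v' h
    show pairCnt [u, v] = pairCnt [u, v']
    rw [pairCnt, pairCnt]
    have : (u > 0 ∧ v < 0) ↔ (u > 0 ∧ v' < 0) := and_congr Iff.rfl h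
    split_ifs with hx hy hy
    · simp [pairCnt]
    · exact absurd (this.mp hx) hy
    · exact absurd (this.mpr hy) hx
    · simp [pairCnt]
  | cons w ws ih =>
    intro u v v' h
    have h1 : pairCnt (u :: (w :: ws) ++ [v]) = (if u > 0 ∧ w < 0 then 1 else 0) + pairCnt (w :: ws ++ [v]) := by
      simp only [List.cons_append]; rw [pairCnt]
    have h2 : pairCnt (u :: (w :: ws) ++ [v']) = (if u > 0 ∧ w < 0 then 1 else 0) + pairCnt (w :: ws ++ [v']) := by
      simp only [List.cons_append]; rw [pairCnt]
    rw [h1, h2, ih w v v' h]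

lemma range_fold_eq (l : List Int) : ∀ c : Int,
    (List.range (l.length - 2)).foldl
      (fun acc k => if l.getD k 0 < l.getD (k+1) 0 ∧ l.getD (k+1) 0 > l.getD (k+2) 0 then acc + 1 else acc) c
    = c + interiorCnt l := by
  induction l with
  | nil => intro c; simp [interiorCnt]
  | cons a t ih =>
    intro c
    match t with
    | [] => simp [interiorCnt]
    | [b] => simp [interiorCnt]
    | b :: cc :: v =>
      have hlen : (a :: b :: cc :: v).length - 2 = (v.length) + 1 := by simp
      rw [hlen, List.range_succ_eq_map, List.foldl_cons, List.foldl_map]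
      have hbody : (fun (acc : Int) (k : Nat) =>
          if (a :: b :: cc :: v).getD (k+1) 0 < (a :: b :: cc :: v).getD (k+1+1) 0 ∧
             (a :: b :: cc :: v).getD (k+1+1) 0 > (a :: b :: cc :: v).getD (k+1+2) 0
          then acc + 1 else acc)
          = (fun (acc : Int) (k : Nat) =>
          if (b :: cc :: v).getD k 0 < (b :: cc :: v).getD (k+1) 0 ∧
             (b :: cc :: v).getD (k+1) 0 > (b :: cc :: v).getD (k+2) 0
          then acc + 1 else acc) := by
        funext acc k
        have h3 : k + 1 + 2 = (k + 2) + 1 := by omega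
        rw [h3]
        simp
      simp only [Nat.succ_eq_add_one, hbody]
      have hv : (b :: cc :: v).length - 2 = v.length := by simp
      have := ih (if (a :: b :: cc :: v).getD 0 0 < (a :: b :: cc :: v).getD 1 0 ∧
          (a :: b :: cc :: v).getD 1 0 > (a :: b :: cc :: v).getD 2 0 then c + 1 else c)
      rw [hv] at this
      rw [this]
      rw [interiorCnt]
      simp only [List.getD_cons_succ, List.getD_cons_zero]
      split_ifs <;> ring

lemma interior_append (l : List Int) : ∀ s : Int, 2 ≤ l.length →
    interiorCnt (l ++ [s]) = interiorCnt l +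
      (if l.getD (l.length - 2) 0 < l.getD (l.length - 1) 0 ∧ l.getD (l.length - 1) 0 > s then 1 else 0) := by
  induction l with
  | nil => intro s h; simp at h
  | cons a t ih =>
    intro s h
    match t with
    | [] => simp at h
    | [b] =>
      show interiorCnt [a, b, s] = _
      simp [interiorCnt]
    | b :: cc :: v =>
      have h2 : 2 ≤ (b :: cc :: v).length := by simp
      have hA : interiorCnt ((a :: b :: cc :: v) ++ [s]) =
          (if a < b ∧ b > cc then 1 else 0) + interiorCnt ((b :: cc :: v) ++ [s]) := by
        simp only [List.cons_append]
        rw [interiorCnt]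
      rw [hA, ih s h2, interiorCnt]
      have e1 : (a :: b :: cc :: v).length - 2 = ((b :: cc :: v).length - 2) + 1 := by simp
      have e2 : (a :: b :: cc :: v).length - 1 = ((b :: cc :: v).length - 1) + 1 := by simp
      rw [e1, e2]
      simp only [List.getD_cons_succ]
      ring

lemma min_lt_of_mem (l : List Int) (y : Int) (hy : y ∈ l) :
    ((PySem.List.min? l (fun x => x)).getD 0 - 1) < y := by
  match l with
  | [] => simp at hy
  | x0 :: t =>
    have hm := PySem.List.min?_id_cons (x := x0) (t := t)
    have h1 := PySem.List.min?_isMin (xs := x0 :: t) (key := fun x => x) (m := t.foldl min x0) hm y hy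
    have h2 : t.foldl min x0 ≤ y := h1
    rw [hm]
    simp only [Option.getD_some]
    omega

-- ===== VERDICT (by name: the statement is the Claim_ definition above) =====
theorem weather_chaos_spec : Claim_equal_weather_chaos := by
  intro numbers _
  unfold Spec_weather_chaos
  match numbers with
  | [] => decide
  | [x] => simp [weather_chaos, weather_chaos_alt]
  | x0 :: x1 :: rest =>
    set l : List Int := x0 :: x1 :: rest with hl
    have hlen2 : l.length = rest.length + 2 := by simp [hl]
    have hgt : ((l.length : Int)) > 1 := by omega
    have hle : ¬ l.length ≤ 1 := by omega
    unfold weather_chaos weather_chaos_alt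
    simp only [hle, if_false, hgt, if_true]
    rw [PySem.List.pyRange_one]
    have hcnt : ((l.length : Int) - 1 - 1).toNat = l.length - 2 := by omega
    rw [hcnt]
    simp only [List.foldl_map]
    have hbody : (fun (acc : Int) (k : Nat) =>
        if PySem.List.pyGetD l ((1 : Int) + k - 1) 0 < PySem.List.pyGetD l ((1 : Int) + k) 0 ∧
           PySem.List.pyGetD l ((1 : Int) + k) 0 > PySem.List.pyGetD l ((1 : Int) + k + 1) 0
        then acc + 1 else acc)
        = (fun (acc : Int) (k : Nat) =>
        if l.getD k 0 < l.getD (k+1) 0 ∧ l.getD (k+1) 0 > l.getD (k+2) 0 then acc + 1 else acc) := by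
      funext acc k
      have e1 : (1 : Int) + k - 1 = ((k : Nat) : Int) := by ring
      have e2 : (1 : Int) + k = (((k+1 : Nat)) : Int) := by push_cast; ring
      have e3 : (1 : Int) + k + 1 = (((k+2 : Nat)) : Int) := by push_cast; ring
      rw [e1, e3, e2, PySem.List.pyGetD_natCast, PySem.List.pyGetD_natCast, PySem.List.pyGetD_natCast]
    rw [hbody, range_fold_eq]
    rw [mapzip_eq_signsOf, zip2_fold]
    -- proof-side sentinel: anything strictly below every element of l
    set s : Int := (PySem.List.min? l (fun x => x)).getD 0 - 1 with hs
    have hs0 : s < x0 := by rw [hs]; exact min_lt_of_mem l x0 (by simp [hl])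
    have hsl : s < l.getD (l.length - 1) 0 := by
      rw [hs]
      apply min_lt_of_mem
      rw [List.getD_eq_getElem l 0 (by omega)]
      exact List.getElem_mem _
    -- rewrite B's framed sign list as the sign list of the sentinel-padded list
    have hlast : (l.getD (x1 :: rest).length 0) = l.getD (l.length - 1) 0 := by
      simp [hl]
    have hB : pairCnt ([(1 : Int)] ++ signsOf l ++ [-1])
        = interiorCnt (s :: l ++ [s]) := by
      have step1 : pairCnt ((1 : Int) :: signsOf l ++ [-1])
          = pairCnt ((1 : Int) :: signsOf l ++ [sgn (l.getD (l.length - 1) 0) s]) := by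
        apply pairCnt_last
        constructor
        · intro _; unfold sgn; split_ifs <;> omega
        · intro _; omega
      have step2 : pairCnt ((1 : Int) :: signsOf l ++ [sgn (l.getD (l.length - 1) 0) s])
          = pairCnt (sgn s x0 :: signsOf l ++ [sgn (l.getD (l.length - 1) 0) s]) := by
        apply pairCnt_head
        constructor
        · intro _; unfold sgn; split_ifs <;> omega
        · intro _; omega
      have step3 : sgn s x0 :: signsOf l ++ [sgn (l.getD (l.length - 1) 0) s]
          = signsOf (s :: l ++ [s]) := by
        have h1 : signsOf (s :: l ++ [s]) = sgn s x0 :: signsOf (l ++ [s]) := by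
          rw [hl]; simp only [List.cons_append]; rw [signsOf]
        have h2 : signsOf (l ++ [s]) = signsOf l ++ [sgn (l.getD (l.length - 1) 0) s] := by
          rw [hl, signsOf_append, hl.symm, hlast]
        rw [h1, h2]
        simp
      have : pairCnt ([(1 : Int)] ++ signsOf l ++ [-1]) = pairCnt ((1 : Int) :: signsOf l ++ [-1]) := by
        simp
      rw [this, step1, step2, step3, pairCnt_signsOf]
    rw [hB]
    -- split the padded interior count into A's three summands
    have hext : (s :: l ++ [s]) = s :: x0 :: x1 :: (rest ++ [s]) := by simp [hl]
    have hfirst : interiorCnt (s :: l ++ [s])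
        = (if s < x0 ∧ x0 > x1 then 1 else 0) + interiorCnt (l ++ [s]) := by
      rw [hext, interiorCnt]
      simp [hl]
    have happ := interior_append l s (by omega)
    rw [hfirst, happ]
    have hb0 : PySem.List.pyGetD l 0 0 = x0 := by simp [hl, PySem.List.pyGetD_zero_cons]
    have hb1 : PySem.List.pyGetD l 1 0 = x1 := by
      have h1 : ((1 : Nat) : Int) = (1 : Int) := by norm_num
      rw [← h1, PySem.List.pyGetD_natCast]
      simp [hl]
    have hbm1 : PySem.List.pyGetD l (-1) 0 = l.getD (l.length - 1) 0 := by
      rw [PySem.List.pyGetD_neg_ofNat l 1 0 (by omega) (by omega)]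
      rw [List.getD_eq_getElem]
    have hbm2 : PySem.List.pyGetD l (-2) 0 = l.getD (l.length - 2) 0 := by
      rw [PySem.List.pyGetD_neg_ofNat l 2 0 (by omega) (by omega)]
      rw [List.getD_eq_getElem]
    rw [hb0, hb1, hbm1, hbm2]
    split_ifs with h1 h2 h3 h4 h5 h6 h7 h8 <;> omega
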